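-- pv_equiv track=rewrite | github.com/chemima/BOJ | 백준/Gold/14552. Mahjong/Mahjong.py | is_complete_hand
-- ===== SOURCE A (Python) =====
-- from collections import Counter
--
-- def is_complete_hand(tiles):
--     counter = Counter(tiles)
--
--     # 치또이 체크
--     if len(counter) == 7 and all(v == 2 for v in counter.values()):
--         return True
--
--     # Check for 1 head and 4 bodies
--     def can_form_melds(tiles, meld_count=4):
--         if meld_count == 0:
--             return True
--         counter = Counter(tiles)
--         for t in sorted(counter):
--             if counter[t] >= 3:
--                 new_tiles = tiles[:]
--                 new_tiles.remove(t)
--                 new_tiles.remove(t)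
--                 new_tiles.remove(t)
--                 if can_form_melds(new_tiles, meld_count - 1):
--                     return True
--             if t <= 7 and counter[t] > 0 and counter[t + 1] > 0 and counter[t + 2] > 0:
--                 # Try to remove a sequence
--                 new_tiles = tiles[:]
--                 new_tiles.remove(t)
--                 new_tiles.remove(t + 1)
--                 new_tiles.remove(t + 2)
--                 if can_form_melds(new_tiles, meld_count - 1):
--                     return True
--         return False
--
--     # 머리쌍 찾기
--     for t in counter:
--         if counter[t] >= 2:
--             new_tiles = tiles[:]
--             new_tiles.remove(t)
--             new_tiles.remove(t)
--             if can_form_melds(new_tiles):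
--                 return True
--     return False
-- ===== SOURCE B (Python) =====
-- from collections import Counter
--
-- def is_complete_hand(tiles):
--     counts = Counter(tiles)
--     if len(counts) == 7 and all(c == 2 for c in counts.values()):
--         return True
--
--     items0 = [(v, counts[v]) for v in sorted(counts)]
--
--     def melds_possible(items):
--         # Frontier DP: scan the (value, count) pairs left to right keeping the SET of
--         # reachable states (a, b, need): a runs take one copy of the current value and
--         # complete, b runs take one copy of the current value and one of the next,
--         # need = melds still missing (clamped at 0).  No recursion, no copies.
--         states = {(0, 0, 4)}
--         for i in range(len(items)):
--             if any(a == 0 and b == 0 and need == 0 for (a, b, need) in states):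
--                 return True
--             (v, c) = items[i]
--             succ = i + 1 < len(items) and items[i + 1][0] == v + 1
--             nxt = set()
--             for (a, b, need) in states:
--                 if c < a + b:
--                     continue
--                 free = c - a - b
--                 if succ:
--                     hi = min(free, need) if v <= 7 else 0
--                     for n in range(hi + 1):
--                         nxt.add((b, n, max(need - a - (free - n) // 3, 0)))
--                 elif b == 0:
--                     nxt.add((0, 0, max(need - a - free // 3, 0)))
--             states = nxt
--         return any(a == 0 and b == 0 and need == 0 for (a, b, need) in states)
--
--     for idx, (v, c) in enumerate(items0):
--         if c >= 2:
--             mid = [(v, c - 2)] if c > 2 else []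
--             if melds_possible(items0[:idx] + mid + items0[idx + 1:]):
--                 return True
--     return False
-- ===== Notes on version B (the rewrite author's own statement) =====
-- stated objective: faster
-- what changed: Replaces A's backtracking search, which rebuilds a Counter and copies the tile list at every node while trying each tile as a meld head, with an iterative frontier DP: one left-to-right pass over the sorted (value,count) table that maintains the set of reachable (pending-run, pending-run, melds-needed) states, so the meld check does no recursion, no Counter rebuilds and no list copies.
import Mathlib
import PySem

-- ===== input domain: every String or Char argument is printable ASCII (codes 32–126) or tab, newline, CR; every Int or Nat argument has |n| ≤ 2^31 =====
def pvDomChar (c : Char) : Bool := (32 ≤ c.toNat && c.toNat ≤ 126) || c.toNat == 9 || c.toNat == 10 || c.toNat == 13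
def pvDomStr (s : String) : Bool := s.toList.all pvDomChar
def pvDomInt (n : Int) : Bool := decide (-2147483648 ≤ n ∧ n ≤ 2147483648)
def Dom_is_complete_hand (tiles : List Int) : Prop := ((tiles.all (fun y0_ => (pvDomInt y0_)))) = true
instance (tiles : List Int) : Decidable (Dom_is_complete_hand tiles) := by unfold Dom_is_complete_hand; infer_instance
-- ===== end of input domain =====

-- B replaces A's backtracking meld removal (Counter rebuild + list copies per node) by an
-- iterative frontier DP: one scan of the sorted (value, count) table keeping the set of
-- reachable (pending-run, pending-run, melds-needed) states.

-- ===== PORT A =====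

-- tiles.remove(t): every call site is guarded so t is present; the none branch is unreachable
def pvRm (l : List Int) (t : Int) : List Int :=
  match PySem.List.remove? l t with
  | some l' => l'
  | none => l

-- can_form_melds(tiles, meld_count); meld_count is the structural fuel (Python only passes 4,3,2,1,0)
def canFormMelds (tiles : List Int) : Nat → Bool
  | 0 => true
  | k + 1 =>
    let counter := PySem.Dict.counter tiles
    (PySem.List.sorted counter.keys (fun x => x) false).any (fun t =>
      (decide (3 ≤ counter.getD t 0) &&
        canFormMelds (pvRm (pvRm (pvRm tiles t) t) t) k) ||
      (decide (t ≤ 7) && decide (0 < counter.getD t 0) &&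
        decide (0 < counter.getD (t + 1) 0) && decide (0 < counter.getD (t + 2) 0) &&
        canFormMelds (pvRm (pvRm (pvRm tiles t) (t + 1)) (t + 2)) k))

def is_complete_hand (tiles : List Int) : Bool :=
  let counter := PySem.Dict.counter tiles
  if counter.size == 7 && counter.values.all (fun v => v == 2) then true
  else
    counter.keys.any (fun t =>
      decide (2 ≤ counter.getD t 0) && canFormMelds (pvRm (pvRm tiles t) t) 4)

-- ===== PORT B =====

-- python's 'i + 1 < len(items) and items[i + 1][0] == v + 1' on the remaining list
def pvSucc (rest : List (Int × Int)) (v : Int) : Bool :=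
  match rest with | (w, _) :: _ => w == v + 1 | [] => false

-- one transition of the frontier DP: from the states reachable before value v (count c),
-- the states reachable after it; sb = next value is v+1 (python: the inner 'for (a,b,need) in states')
def pvStep (v c : Int) (sb : Bool) (states : List (Int × Int × Int)) :
    List (Int × Int × Int) :=
  states.foldl (fun nxt s =>
    if c < s.1 + s.2.1 then nxt
    else if sb then
      (PySem.List.pyRange 0 ((if v ≤ 7 then min (c - s.1 - s.2.1) s.2.2 else 0) + 1) 1).foldl
        (fun nxt2 n => PySem.Set.add nxt2
          (s.2.1, n, max (s.2.2 - s.1 - PySem.Int.floordiv (c - s.1 - s.2.1 - n) 3) 0)) nxt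
    else if s.2.1 == 0 then
      PySem.Set.add nxt (0, 0, max (s.2.2 - s.1 - PySem.Int.floordiv (c - s.1 - s.2.1) 3) 0)
    else nxt) []

-- melds_possible's scan: python 'for i in range(len(items))' with items[i] / items[i+1] lookahead
def pvScan : List (Int × Int) → List (Int × Int × Int) → Bool
  | [], states => states.any fun s => s.1 == 0 && s.2.1 == 0 && s.2.2 == 0
  | (v, c) :: rest, states =>
    if states.any (fun s => s.1 == 0 && s.2.1 == 0 && s.2.2 == 0) then true
    else pvScan rest (pvStep v c (pvSucc rest v) states)

def is_complete_hand_alt (tiles : List Int) : Bool :=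
  let counts := PySem.Dict.counter tiles
  if counts.size == 7 && counts.values.all (fun v => v == 2) then true
  else
    let items0 := (PySem.List.sorted counts.keys (fun x => x) false).map
      (fun v => (v, counts.getD v 0))
    (PySem.List.enumerate items0 0).any fun p =>
      decide (2 ≤ p.2.2) &&
        pvScan (PySem.List.slice items0 none (some p.1) ++
              (if 2 < p.2.2 then [(p.2.1, p.2.2 - 2)] else []) ++
              PySem.List.slice items0 (some (p.1 + 1)) none) [(0, 0, 4)]

-- ===== PRECONDITION & SPEC =====
def Spec_is_complete_hand (tiles : List Int) (out : Bool) : Prop := out = is_complete_hand_alt tiles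
instance (tiles : List Int) (out : Bool) : Decidable (Spec_is_complete_hand tiles out) := by unfold Spec_is_complete_hand; infer_instance

-- ===== CLAIM (what is proved, stated in full; the proofs are below) =====
def Claim_equal_is_complete_hand : Prop := ∀ (tiles : List Int), Dom_is_complete_hand tiles → Spec_is_complete_hand tiles (is_complete_hand tiles)

-- ===== LEMMAS AND PROOFS =====

-- A meld: (t, true) = triplet {t,t,t}; (t, false) = run {t,t+1,t+2} (only legal for t ≤ 7)
def pvMeld : Int × Bool → Multiset Int
  | (t, true) => {t, t, t}
  | (t, false) => {t, t + 1, t + 2}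

def pvOk (p : Int × Bool) : Prop := p.2 = true ∨ p.1 ≤ 7

-- "k melds can be extracted from the multiset m"
def pvExtract (m : Multiset Int) (k : Nat) : Prop :=
  ∃ L : List (Int × Bool), L.length = k ∧ (∀ p ∈ L, pvOk p) ∧ (L.map pvMeld).sum ≤ m

theorem count_meld_tri (a t : Int) :
    (pvMeld (t, true)).count a = if a = t then 3 else 0 := by
  simp only [pvMeld, Multiset.insert_eq_cons, Multiset.count_cons, Multiset.count_singleton]
  split_ifs <;> omega

theorem count_meld_run (a t : Int) :
    (pvMeld (t, false)).count a =
      (if a = t then 1 else 0) + (if a = t + 1 then 1 else 0) + (if a = t + 2 then 1 else 0) := by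
  simp only [pvMeld, Multiset.insert_eq_cons, Multiset.count_cons, Multiset.count_singleton]
  split_ifs <;> omega

theorem pvMeld_ne_zero (p : Int × Bool) : pvMeld p ≠ 0 := by
  obtain ⟨t, b⟩ := p; cases b <;> simp [pvMeld]

theorem pvExtract_zero (m : Multiset Int) : pvExtract m 0 :=
  ⟨[], rfl, by simp, by simp⟩

theorem pvExtract_nil_succ (k : Nat) : ¬ pvExtract 0 (k + 1) := by
  rintro ⟨L, hlen, -, hsum⟩
  cases L with
  | nil => simp at hlen
  | cons p L' =>
    have : pvMeld p ≤ 0 := le_trans (Multiset.le_add_right _ _) (by simpa using hsum)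
    exact pvMeld_ne_zero p (le_antisymm this (Multiset.zero_le _))

theorem pvExtract_cons {m : Multiset Int} {k : Nat} {p : Int × Bool}
    (hok : pvOk p) (hle : pvMeld p ≤ m) (h : pvExtract (m - pvMeld p) k) :
    pvExtract m (k + 1) := by
  obtain ⟨L, h1, h2, h3⟩ := h
  refine ⟨p :: L, by simp [h1], ?_, ?_⟩
  · rintro q hq
    rcases List.mem_cons.mp hq with h | h
    · exact h ▸ hok
    · exact h2 _ h
  · simp only [List.map_cons, List.sum_cons]
    calc pvMeld p + (L.map pvMeld).sum ≤ pvMeld p + (m - pvMeld p) := by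
          exact add_le_add le_rfl h3
      _ = m := add_tsub_cancel_of_le hle

theorem pvExtract_mem {m : Multiset Int} {k : Nat} {L : List (Int × Bool)} {p : Int × Bool}
    (hlen : L.length = k + 1) (hok : ∀ q ∈ L, pvOk q) (hsum : (L.map pvMeld).sum ≤ m)
    (hp : p ∈ L) :
    pvOk p ∧ pvMeld p ≤ m ∧ pvExtract (m - pvMeld p) k := by
  have hperm := List.perm_cons_erase hp
  have hsum' : ((p :: L.erase p).map pvMeld).sum ≤ m := by
    rwa [← List.Perm.sum_eq (List.Perm.map pvMeld hperm)]
  simp only [List.map_cons, List.sum_cons] at hsum'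
  refine ⟨hok p hp, le_trans (Multiset.le_add_right _ _) hsum', ?_⟩
  refine ⟨L.erase p, ?_, fun q hq => hok q (List.mem_of_mem_erase hq),
    le_tsub_of_add_le_left hsum'⟩
  have := hperm.length_eq
  simp only [List.length_cons, hlen] at this
  omega

theorem pvExtract_succ {m : Multiset Int} {k : Nat} :
    pvExtract m (k + 1) ↔ ∃ p, pvOk p ∧ pvMeld p ≤ m ∧ pvExtract (m - pvMeld p) k := by
  constructor
  · rintro ⟨L, hlen, hok, hsum⟩
    cases L with
    | nil => simp at hlen
    | cons p L' =>
      exact ⟨p, (pvExtract_mem hlen hok hsum (List.mem_cons_self)).1,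
        (pvExtract_mem hlen hok hsum (List.mem_cons_self)).2.1,
        (pvExtract_mem hlen hok hsum (List.mem_cons_self)).2.2⟩
  · rintro ⟨p, h1, h2, h3⟩; exact pvExtract_cons h1 h2 h3

-- ===== A side: canFormMelds decides pvExtract =====

theorem pvRm_coe (l : List Int) (t : Int) (h : t ∈ l) :
    (↑(pvRm l t) : Multiset Int) = ↑l - {t} := by
  rw [pvRm, PySem.List.remove?_eq_some_erase l t h]
  rw [Multiset.sub_singleton, ← Multiset.coe_erase]

theorem coe_rm_tri (l : List Int) (t : Int) (h : 3 ≤ l.count t) :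
    (↑(pvRm (pvRm (pvRm l t) t) t) : Multiset Int) = ↑l - pvMeld (t, true) := by
  have m1 : t ∈ l := List.count_pos_iff.mp (by omega)
  have e1 := pvRm_coe l t m1
  have c1 : (↑(pvRm l t) : Multiset Int).count t = l.count t - 1 := by
    rw [e1, Multiset.count_sub]; simp
  have m2 : t ∈ pvRm l t := by
    rw [← Multiset.mem_coe, ← Multiset.count_pos, c1]; omega
  have e2 := pvRm_coe (pvRm l t) t m2
  have c2 : (↑(pvRm (pvRm l t) t) : Multiset Int).count t = l.count t - 2 := by
    rw [e2, Multiset.count_sub, c1]; simp; omega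
  have m3 : t ∈ pvRm (pvRm l t) t := by
    rw [← Multiset.mem_coe, ← Multiset.count_pos, c2]; omega
  rw [pvRm_coe _ t m3, e2, e1]
  ext a
  simp only [Multiset.count_sub, count_meld_tri, Multiset.count_singleton]
  split_ifs <;> omega

theorem coe_rm_run (l : List Int) (t : Int) (h1 : 1 ≤ l.count t)
    (h2 : 1 ≤ l.count (t + 1)) (h3 : 1 ≤ l.count (t + 2)) :
    (↑(pvRm (pvRm (pvRm l t) (t + 1)) (t + 2)) : Multiset Int) = ↑l - pvMeld (t, false) := by
  have m1 : t ∈ l := List.count_pos_iff.mp (by omega)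
  have e1 := pvRm_coe l t m1
  have c1 : (↑(pvRm l t) : Multiset Int).count (t + 1) = l.count (t + 1) := by
    rw [e1, Multiset.count_sub, Multiset.coe_count, Multiset.count_singleton]
    split_ifs <;> omega
  have m2 : t + 1 ∈ pvRm l t := by
    rw [← Multiset.mem_coe, ← Multiset.count_pos, c1]; omega
  have e2 := pvRm_coe (pvRm l t) (t + 1) m2
  have c2 : (↑(pvRm (pvRm l t) (t + 1)) : Multiset Int).count (t + 2) = l.count (t + 2) := by
    rw [e2, Multiset.count_sub, e1, Multiset.count_sub, Multiset.coe_count,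
      Multiset.count_singleton, Multiset.count_singleton]
    split_ifs <;> omega
  have m3 : t + 2 ∈ pvRm (pvRm l t) (t + 1) := by
    rw [← Multiset.mem_coe, ← Multiset.count_pos, c2]; omega
  rw [pvRm_coe _ (t + 2) m3, e2, e1]
  ext a
  simp only [Multiset.count_sub, count_meld_run, Multiset.count_singleton]
  split_ifs <;> omega

theorem A_iff (k : Nat) (tiles : List Int) :
    canFormMelds tiles k = true ↔ pvExtract (↑tiles) k := by
  induction k generalizing tiles with
  | zero => simpa [canFormMelds] using pvExtract_zero ↑tiles
  | succ k ih =>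
    rw [canFormMelds]
    simp only [List.any_eq_true, Bool.or_eq_true, Bool.and_eq_true, decide_eq_true_eq,
      PySem.List.mem_sorted, PySem.Dict.keys_counter, PySem.Set.mem_ofList,
      PySem.Dict.getD_counter]
    constructor
    · rintro ⟨t, htl, h | h⟩
      · obtain ⟨hc, hrec⟩ := h
        have hc' : 3 ≤ tiles.count t := by exact_mod_cast hc
        refine pvExtract_cons (p := (t, true)) (Or.inl rfl) ?_ ?_
        · rw [Multiset.le_iff_count]
          intro a
          rw [count_meld_tri, Multiset.coe_count]
          split_ifs with ha
          · subst ha; omega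
          · omega
        · rw [← coe_rm_tri tiles t hc']; exact (ih _).mp hrec
      · obtain ⟨⟨⟨⟨ht7, hc0⟩, hc1⟩, hc2⟩, hrec⟩ := h
        have hc0' : 1 ≤ tiles.count t := by exact_mod_cast hc0
        have hc1' : 1 ≤ tiles.count (t + 1) := by exact_mod_cast hc1
        have hc2' : 1 ≤ tiles.count (t + 2) := by exact_mod_cast hc2
        refine pvExtract_cons (p := (t, false)) (Or.inr ht7) ?_ ?_
        · rw [Multiset.le_iff_count]
          intro a
          rw [count_meld_run, Multiset.coe_count]
          split_ifs <;> subst_vars <;> omega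
        · rw [← coe_rm_run tiles t hc0' hc1' hc2']; exact (ih _).mp hrec
    · intro h
      obtain ⟨p, hok, hle, hrest⟩ := pvExtract_succ.mp h
      obtain ⟨t, b⟩ := p
      cases b with
      | true =>
        have hc : 3 ≤ tiles.count t := by
          have := Multiset.le_iff_count.mp hle t
          rw [count_meld_tri, Multiset.coe_count] at this
          simpa using this
        refine ⟨t, List.count_pos_iff.mp (by omega), Or.inl ⟨by exact_mod_cast hc, ?_⟩⟩
        exact (ih _).mpr (by rw [coe_rm_tri tiles t hc]; exact hrest)
      | false =>
        have hc0 : 1 ≤ tiles.count t := by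
          have := Multiset.le_iff_count.mp hle t
          rw [count_meld_run, Multiset.coe_count] at this
          split_ifs at this <;> omega
        have hc1 : 1 ≤ tiles.count (t + 1) := by
          have := Multiset.le_iff_count.mp hle (t + 1)
          rw [count_meld_run, Multiset.coe_count] at this
          split_ifs at this <;> omega
        have hc2 : 1 ≤ tiles.count (t + 2) := by
          have := Multiset.le_iff_count.mp hle (t + 2)
          rw [count_meld_run, Multiset.coe_count] at this
          split_ifs at this <;> omega
        have ht7 : t ≤ 7 := hok.resolve_left (by simp)
        refine ⟨t, List.count_pos_iff.mp (by omega),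
          Or.inr ⟨⟨⟨⟨ht7, by exact_mod_cast hc0⟩, by exact_mod_cast hc1⟩,
            by exact_mod_cast hc2⟩, ?_⟩⟩
        exact (ih _).mpr (by rw [coe_rm_run tiles t hc0 hc1 hc2]; exact hrest)

-- ===== B side: the carry-scan dp decides pvExtract =====

-- invariant of the (value, count) table: strictly increasing values, positive counts
def pvInv (items : List (Int × Int)) : Prop :=
  items.Pairwise (fun a b => a.1 < b.1) ∧ ∀ p ∈ items, 1 ≤ p.2

def pvToM (items : List (Int × Int)) : Multiset Int :=
  (items.map (fun p => Multiset.replicate p.2.toNat p.1)).sum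

theorem pvToM_cons (t c : Int) (rest : List (Int × Int)) :
    pvToM ((t, c) :: rest) = Multiset.replicate c.toNat t + pvToM rest := by
  simp [pvToM]

theorem count_toM_not_mem (items : List (Int × Int)) (x : Int)
    (h : x ∉ items.map Prod.fst) : (pvToM items).count x = 0 := by
  induction items with
  | nil => simp [pvToM]
  | cons p rest ih =>
    obtain ⟨t, c⟩ := p
    simp only [List.map_cons, List.mem_cons] at h
    push Not at h
    rw [pvToM_cons, Multiset.count_add, Multiset.count_replicate,
      if_neg (show ¬ t = x from fun hh => h.1 hh.symm), ih h.2]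

theorem mem_toM (items : List (Int × Int)) (a : Int) (h : a ∈ pvToM items) :
    a ∈ items.map Prod.fst := by
  by_contra hc
  rw [← Multiset.count_pos, count_toM_not_mem items a hc] at h
  omega

theorem head_min (t c : Int) (rest : List (Int × Int)) (h : pvInv ((t, c) :: rest))
    (a : Int) (ha : a ∈ pvToM ((t, c) :: rest)) : t ≤ a := by
  obtain ⟨hpw, -⟩ := h
  rw [List.pairwise_cons] at hpw
  rcases List.mem_cons.mp (mem_toM _ a ha) with rfl | hm
  · exact le_refl _
  · obtain ⟨q, hq, hq1⟩ := List.mem_map.mp hm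
    have := hpw.1 q hq
    omega

theorem pvInv_tail (p : Int × Int) (rest : List (Int × Int)) (h : pvInv (p :: rest)) :
    pvInv rest :=
  ⟨(List.pairwise_cons.mp h.1).2, fun q hq => h.2 q (List.mem_cons_of_mem _ hq)⟩

-- the specification dp computes: melds L extractable alongside the pending obligations
def pvPX (items : List (Int × Int)) (a b need : Int) : Prop :=
  match items with
  | [] => a = 0 ∧ b = 0 ∧ need ≤ 0
  | (v, _) :: _ =>
    ∃ L : List (Int × Bool),
      (∀ p ∈ L, pvOk p) ∧
      Multiset.replicate (a + b).toNat v + Multiset.replicate b.toNat (v + 1) +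
        (L.map pvMeld).sum ≤ pvToM items ∧
      need ≤ a + b + (L.length : Int)


theorem meld_head_count (p : Int × Bool) : 1 ≤ (pvMeld p).count p.1 := by
  obtain ⟨t, b⟩ := p
  cases b
  · rw [count_meld_run]; simp
  · rw [count_meld_tri]; simp

theorem meld_le_sum (L : List (Int × Bool)) (p : Int × Bool) (hp : p ∈ L) :
    pvMeld p ≤ (L.map pvMeld).sum := by
  induction L with
  | nil => simp at hp
  | cons q rest ih =>
    simp only [List.map_cons, List.sum_cons]
    rcases List.mem_cons.mp hp with rfl | hp
    · exact Multiset.le_add_right _ _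
    · exact le_trans (ih hp) (Multiset.le_add_left _ _)

theorem sum_meld_count_low (L : List (Int × Bool)) (x : Int) (h : ∀ p ∈ L, x < p.1) :
    (L.map pvMeld).sum.count x = 0 := by
  induction L with
  | nil => simp
  | cons q rest ih =>
    obtain ⟨t, b⟩ := q
    have ht : x < t := h (t, b) List.mem_cons_self
    simp only [List.map_cons, List.sum_cons, Multiset.count_add]
    rw [ih (fun p hp => h p (List.mem_cons_of_mem _ hp))]
    cases b
    · rw [count_meld_run]; split_ifs <;> omega
    · rw [count_meld_tri]; split_ifs <;> omega

theorem sum_meld_decomp (L : List (Int × Bool)) (v : Int) :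
    (L.map pvMeld).sum =
      (L.count (v, true)) • pvMeld (v, true) + (L.count (v, false)) • pvMeld (v, false) +
        ((L.filter (fun p => decide (p.1 ≠ v))).map pvMeld).sum := by
  induction L with
  | nil => simp
  | cons q rest ih =>
    obtain ⟨t, b⟩ := q
    by_cases hq : t = v
    · subst hq
      cases b <;>
        · simp only [List.map_cons, List.sum_cons, List.count_cons, List.filter_cons, ih]
          norm_num [succ_nsmul]
          abel
    · have n1 : ((t, b) : Int × Bool) ≠ (v, true) := by
        intro h; injection h with h1 h2; exact hq h1
      have n2 : ((t, b) : Int × Bool) ≠ (v, false) := by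
        intro h; injection h with h1 h2; exact hq h1
      rw [List.map_cons, List.sum_cons, List.count_cons_of_ne n1, List.count_cons_of_ne n2,
        List.filter_cons_of_pos (by simpa using hq), List.map_cons, List.sum_cons, ih]
      abel

theorem len_decomp (L : List (Int × Bool)) (v : Int) :
    L.length = L.count (v, true) + L.count (v, false) +
      (L.filter (fun p => decide (p.1 ≠ v))).length := by
  induction L with
  | nil => simp
  | cons q rest ih =>
    obtain ⟨t, b⟩ := q
    by_cases hq : t = v
    · subst hq
      cases b <;> simp [List.count_cons, ih] <;> omega
    · have n1 : ((t, b) : Int × Bool) ≠ (v, true) := by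
        intro h; injection h with h1 h2; exact hq h1
      have n2 : ((t, b) : Int × Bool) ≠ (v, false) := by
        intro h; injection h with h1 h2; exact hq h1
      rw [List.length_cons, List.count_cons_of_ne n1, List.count_cons_of_ne n2,
        List.filter_cons_of_pos (by simpa using hq), List.length_cons, ih]
      omega

-- the three floordiv facts omega needs
theorem fd3 (x : Int) : PySem.Int.floordiv x 3 = x / 3 :=
  PySem.Int.floordiv_eq_ediv_of_pos (by norm_num)

-- proof-side bridge: the recursive dp the scan's frontier realizes
def pvDp (items : List (Int × Int)) (a b need : Int) : Bool :=
  match items with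
  | [] => if need ≤ 0 ∧ a = 0 ∧ b = 0 then true else false
  | (v, c) :: rest =>
    if need ≤ 0 ∧ a = 0 ∧ b = 0 then true
    else if c < a + b then false
    else if pvSucc rest v then
      (PySem.List.pyRange 0 ((if v ≤ 7 then min (c - a - b) (max need 0) else 0) + 1) 1).any
        fun n => pvDp rest b n (need - a - PySem.Int.floordiv (c - a - b - n) 3)
    else
      b == 0 && pvDp rest 0 0 (need - a - PySem.Int.floordiv (c - a - b) 3)
termination_by structural items


theorem pvDp_nil (a b need : Int) :
    pvDp [] a b need = if need ≤ 0 ∧ a = 0 ∧ b = 0 then true else false := rfl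

theorem pvDp_cons (v c : Int) (rest : List (Int × Int)) (a b need : Int) :
    pvDp ((v, c) :: rest) a b need =
      (if need ≤ 0 ∧ a = 0 ∧ b = 0 then true
      else if c < a + b then false
      else if pvSucc rest v then
        (PySem.List.pyRange 0 ((if v ≤ 7 then min (c - a - b) (max need 0) else 0) + 1) 1).any
          fun n => pvDp rest b n (need - a - PySem.Int.floordiv (c - a - b - n) 3)
      else
        b == 0 && pvDp rest 0 0 (need - a - PySem.Int.floordiv (c - a - b) 3)) := rfl

theorem pvPX_nil (a b need : Int) : pvPX [] a b need = (a = 0 ∧ b = 0 ∧ need ≤ 0) := rfl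

theorem pvPX_cons (v c : Int) (rest : List (Int × Int)) (a b need : Int) :
    pvPX ((v, c) :: rest) a b need =
      (∃ L : List (Int × Bool),
        (∀ p ∈ L, pvOk p) ∧
        Multiset.replicate (a + b).toNat v + Multiset.replicate b.toNat (v + 1) +
          (L.map pvMeld).sum ≤ pvToM ((v, c) :: rest) ∧
        need ≤ a + b + (L.length : Int)) := rfl

theorem dp_iff (items : List (Int × Int)) : ∀ (a b need : Int), pvInv items → 0 ≤ a → 0 ≤ b →
    (pvDp items a b need = true ↔ pvPX items a b need) := by
  induction items with
  | nil =>
    intro a b need _ ha hb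
    rw [pvDp_nil, pvPX]
    split_ifs with h
    · simp only [true_iff]
      exact ⟨h.2.1, h.2.2, h.1⟩
    · simp only [Bool.false_eq_true, false_iff]
      rintro ⟨h1, h2, h3⟩
      exact h ⟨h3, h1, h2⟩
  | cons q rest ih =>
    obtain ⟨v, c⟩ := q
    intro a b need hinv ha hb
    have hinvr := pvInv_tail _ _ hinv
    have hc1 : 1 ≤ c := hinv.2 (v, c) List.mem_cons_self
    have hvlo : ∀ p ∈ rest, v < p.1 := (List.pairwise_cons.mp hinv.1).1
    have hMv0 : (pvToM rest).count v = 0 := by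
      apply count_toM_not_mem
      intro hm
      obtain ⟨p, hp, hp1⟩ := List.mem_map.mp hm
      exact absurd hp1 (ne_of_gt (hvlo p hp))
    have hMv : ∀ x : Int, (pvToM ((v, c) :: rest)).count x =
        (if v = x then c.toNat else 0) + (pvToM rest).count x := by
      intro x
      rw [pvToM_cons, Multiset.count_add, Multiset.count_replicate]
    rw [pvDp_cons]
    by_cases hE : need ≤ 0 ∧ a = 0 ∧ b = 0
    · rw [if_pos hE]
      simp only [true_iff]
      refine ⟨[], by simp, ?_, by simp; omega⟩
      simp [hE.2.1, hE.2.2]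
    · rw [if_neg hE]
      by_cases hcab : c < a + b
      · simp only [if_pos hcab, Bool.false_eq_true, false_iff]
        rintro ⟨L, hok, hle, hneed⟩
        have hne : ¬ (v + 1 = v) := by omega
        have := Multiset.le_iff_count.mp hle v
        simp [hMv, hMv0, hne] at this
        omega
      · rw [if_neg hcab]
        cases rest with
        | nil =>
          rw [if_neg (by simp [pvSucc])]
          rw [pvDp_nil, pvPX_cons]
          have ht : PySem.Int.floordiv (c - a - b) 3 = (c - a - b) / 3 := fd3 _
          constructor
          · intro h
            rw [Bool.and_eq_true, beq_iff_eq] at h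
            obtain ⟨hb0, hrec⟩ := h
            split_ifs at hrec with hcond
            · refine ⟨List.replicate (PySem.Int.floordiv (c - a - b) 3).toNat (v, true),
                ?_, ?_, ?_⟩
              · intro p hp
                rw [List.eq_of_mem_replicate hp]; exact Or.inl rfl
              · rw [Multiset.le_iff_count]
                intro x
                simp only [List.map_replicate, List.sum_replicate, Multiset.count_add,
                  Multiset.count_nsmul, Multiset.count_replicate, count_meld_tri, hMv,
                  show pvToM [] = 0 from rfl, Multiset.count_zero]
                split_ifs <;> try omega
              · simp only [List.length_replicate]
                try omega
          · rintro ⟨L, hok, hle, hneed⟩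
            have hhead : ∀ p ∈ L, p.1 = v := by
              intro p hp
              have hle0 : (L.map pvMeld).sum ≤ pvToM [(v, c)] :=
                le_trans (Multiset.le_add_left _ _) hle
              have h2 := Multiset.le_iff_count.mp (le_trans (meld_le_sum L p hp) hle0) p.1
              have h3 := meld_head_count p
              by_contra hne
              rw [hMv p.1, if_neg (fun h => hne h.symm)] at h2
              simp only [show pvToM [] = 0 from rfl, Multiset.count_zero] at h2
              omega
            have hLf : L.filter (fun p => decide (p.1 ≠ v)) = [] :=
              List.filter_eq_nil_iff.mpr (fun p hp => by simp [hhead p hp])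
            rw [sum_meld_decomp L v, hLf] at hle
            have hlen := len_decomp L v
            rw [hLf] at hlen
            have hne1 : ¬ (v + 1 = v) := by omega
            have hne2 : ¬ (v + 1 = v + 2) := by omega
            have hne3 : ¬ (v = v + 1) := by omega
            have hne4 : ¬ (v = v + 2) := by omega
            have e1 := Multiset.le_iff_count.mp hle v
            have e2 := Multiset.le_iff_count.mp hle (v + 1)
            simp [Multiset.count_nsmul, count_meld_tri, count_meld_run, hMv,
              show pvToM [] = 0 from rfl, hne1, hne2, hne3, hne4] at e1 e2
            simp only [List.length_nil, Nat.add_zero] at hlen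
            have hb0 : b = 0 := by omega
            rw [Bool.and_eq_true, beq_iff_eq]
            refine ⟨hb0, ?_⟩
            rw [if_pos ⟨by omega, rfl, rfl⟩]
        | cons qq rest' =>
          obtain ⟨w, c1⟩ := qq
          have hvw : v < w := hvlo (w, c1) List.mem_cons_self
          have hne1 : ¬ (v + 1 = v) := by omega
          have hne2 : ¬ (v + 1 = v + 2) := by omega
          have hne3 : ¬ (v = v + 1) := by omega
          have hne4 : ¬ (v = v + 2) := by omega
          by_cases hw : w = v + 1
          · subst hw
            rw [if_pos (by simp [pvSucc])]
            rw [List.any_eq_true, pvPX_cons]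
            constructor
            · rintro ⟨n, hn, hf⟩
              obtain ⟨hn0, hnhi⟩ := (PySem.List.mem_pyRange_one).mp hn
              have ht : PySem.Int.floordiv (c - a - b - n) 3 = (c - a - b - n) / 3 := fd3 _
              have hv7n : 0 < n → v ≤ 7 := by
                intro hpos
                by_contra h7
                rw [if_neg h7] at hnhi
                omega
              have hnfree : n ≤ c - a - b := by
                by_cases h7 : v ≤ 7
                · rw [if_pos h7] at hnhi; omega
                · rw [if_neg h7] at hnhi; omega
              obtain ⟨L2, hok2, hle2, hneed2⟩ := by
                have := (ih b n _ hinvr hb hn0).mp hf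
                rwa [pvPX_cons] at this
              refine ⟨List.replicate (PySem.Int.floordiv (c - a - b - n) 3).toNat (v, true) ++
                (List.replicate n.toNat (v, false) ++ L2), ?_, ?_, ?_⟩
              · intro p hp
                rcases List.mem_append.mp hp with hp' | hp'
                · rw [List.eq_of_mem_replicate hp']; exact Or.inl rfl
                · rcases List.mem_append.mp hp' with hp'' | hp''
                  · rw [List.eq_of_mem_replicate hp'']
                    refine Or.inr (hv7n ?_)
                    have := (List.mem_replicate.mp hp'').1
                    omega
                  · exact hok2 p hp''
              · rw [Multiset.le_iff_count]
                intro x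
                have h2 := Multiset.le_iff_count.mp hle2 x
                simp only [Multiset.count_add, Multiset.count_replicate, hMv] at h2 ⊢
                simp only [List.map_append, List.sum_append, List.map_replicate,
                  List.sum_replicate, Multiset.count_add, Multiset.count_nsmul,
                  count_meld_tri, count_meld_run, Multiset.count_replicate]
                by_cases hx1 : v = x
                · subst hx1
                  split_ifs at h2 ⊢ <;> omega
                · split_ifs at h2 ⊢ <;> omega
              · simp only [List.length_append, List.length_replicate]
                push_cast
                omega
            · rintro ⟨L, hok, hle, hneed⟩
              have hle0 : (L.map pvMeld).sum ≤ pvToM ((v, c) :: (v + 1, c1) :: rest') :=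
                le_trans (Multiset.le_add_left _ _) hle
              have hheadlo : ∀ p ∈ L, v ≤ p.1 := by
                intro p hp
                have h2 := Multiset.le_iff_count.mp (le_trans (meld_le_sum L p hp) hle0) p.1
                have h3 := meld_head_count p
                exact head_min v c _ hinv p.1 (by rw [← Multiset.count_pos]; omega)
              have hL'lo : ∀ p ∈ L.filter (fun p => decide (p.1 ≠ v)), v < p.1 := by
                intro p hp
                have h1 := hheadlo p (List.mem_of_mem_filter hp)
                have h2 := List.of_mem_filter hp
                simp only [decide_eq_true_eq] at h2
                omega
              have hSv : ((L.filter (fun p => decide (p.1 ≠ v))).map pvMeld).sum.count v = 0 :=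
                sum_meld_count_low _ v hL'lo
              rw [sum_meld_decomp L v] at hle
              have hlen := len_decomp L v
              have e1 := Multiset.le_iff_count.mp hle v
              simp [Multiset.count_nsmul, count_meld_tri, count_meld_run, hMv, hMv0, hSv,
                hne1, hne2, hne3, hne4] at e1
              have hvn7 : L.count (v, false) ≠ 0 → v ≤ 7 := by
                intro hne0
                have hmem : ((v, false) : Int × Bool) ∈ L :=
                  List.count_pos_iff.mp (Nat.pos_of_ne_zero hne0)
                rcases hok _ hmem with h | h
                · exact absurd h (by simp)
                · exact h
              refine ⟨min (L.count (v, false) : Int) (max need 0),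
                PySem.List.mem_pyRange_one.mpr ⟨by omega, ?_⟩, ?_⟩
              · by_cases h7 : v ≤ 7
                · rw [if_pos h7]; omega
                · rw [if_neg h7]
                  have : L.count (v, false) = 0 := by
                    by_contra hne0; exact h7 (hvn7 hne0)
                  omega
              · apply (ih b (min (L.count (v, false) : Int) (max need 0)) _ hinvr hb
                  (by omega)).mpr
                rw [pvPX_cons]
                refine ⟨L.filter (fun p => decide (p.1 ≠ v)),
                  fun p hp => hok p (List.mem_of_mem_filter hp), ?_, ?_⟩
                · rw [Multiset.le_iff_count]
                  intro x
                  have hx := Multiset.le_iff_count.mp hle x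
                  simp only [Multiset.count_add, Multiset.count_nsmul,
                    Multiset.count_replicate, count_meld_tri, count_meld_run, hMv] at hx ⊢
                  by_cases hx1 : v = x
                  · subst hx1
                    split_ifs at hx ⊢ <;> omega
                  · split_ifs at hx ⊢ <;> omega
                · have ht2 : PySem.Int.floordiv
                      (c - a - b - min (L.count (v, false) : Int) (max need 0)) 3 =
                      (c - a - b - min (L.count (v, false) : Int) (max need 0)) / 3 := fd3 _
                  push_cast [hlen] at hneed ⊢
                  omega
          · rw [if_neg (by simp [pvSucc, hw])]
            have ht : PySem.Int.floordiv (c - a - b) 3 = (c - a - b) / 3 := fd3 _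
            have hM1 : (pvToM ((w, c1) :: rest')).count (v + 1) = 0 := by
              apply count_toM_not_mem
              intro hm
              obtain ⟨p, hp, hp1⟩ := List.mem_map.mp hm
              rcases List.mem_cons.mp hp with heq | hp'
              · rw [heq] at hp1; exact hw hp1
              · have hwp := (List.pairwise_cons.mp hinvr.1).1 p hp'
                omega
            rw [Bool.and_eq_true, beq_iff_eq, pvPX_cons]
            constructor
            · rintro ⟨hb0, hrec⟩
              obtain ⟨L2, hok2, hle2, hneed2⟩ := by
                have := (ih 0 0 (need - a - PySem.Int.floordiv (c - a - b) 3) hinvr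
                  le_rfl le_rfl).mp hrec
                rwa [pvPX_cons] at this
              refine ⟨List.replicate (PySem.Int.floordiv (c - a - b) 3).toNat (v, true) ++ L2,
                ?_, ?_, ?_⟩
              · intro p hp
                rcases List.mem_append.mp hp with hp' | hp'
                · rw [List.eq_of_mem_replicate hp']; exact Or.inl rfl
                · exact hok2 p hp'
              · rw [Multiset.le_iff_count]
                intro x
                have h2 := Multiset.le_iff_count.mp hle2 x
                simp only [Multiset.count_add, Multiset.count_replicate, hMv,
                  show ((0 : Int) + 0).toNat = 0 from rfl, show ((0 : Int)).toNat = 0 from rfl,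
                  Multiset.replicate_zero, Multiset.count_zero, zero_add] at h2 ⊢
                simp only [List.map_append, List.sum_append, List.map_replicate,
                  List.sum_replicate, Multiset.count_add, Multiset.count_nsmul,
                  count_meld_tri, Multiset.count_replicate]
                subst hb0
                by_cases hx1 : v = x
                · subst hx1
                  split_ifs at h2 ⊢ <;> omega
                · split_ifs at h2 ⊢ <;> omega
              · simp only [List.length_append, List.length_replicate]
                push_cast
                omega
            · rintro ⟨L, hok, hle, hneed⟩
              have hle0 : (L.map pvMeld).sum ≤ pvToM ((v, c) :: (w, c1) :: rest') :=
                le_trans (Multiset.le_add_left _ _) hle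
              have hheadlo : ∀ p ∈ L, v ≤ p.1 := by
                intro p hp
                have h2 := Multiset.le_iff_count.mp (le_trans (meld_le_sum L p hp) hle0) p.1
                have h3 := meld_head_count p
                exact head_min v c _ hinv p.1 (by rw [← Multiset.count_pos]; omega)
              have hL'lo : ∀ p ∈ L.filter (fun p => decide (p.1 ≠ v)), v < p.1 := by
                intro p hp
                have h1 := hheadlo p (List.mem_of_mem_filter hp)
                have h2 := List.of_mem_filter hp
                simp only [decide_eq_true_eq] at h2
                omega
              have hSv : ((L.filter (fun p => decide (p.1 ≠ v))).map pvMeld).sum.count v = 0 :=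
                sum_meld_count_low _ v hL'lo
              rw [sum_meld_decomp L v] at hle
              have hlen := len_decomp L v
              have e1 := Multiset.le_iff_count.mp hle v
              have e2 := Multiset.le_iff_count.mp hle (v + 1)
              simp [Multiset.count_nsmul, count_meld_tri, count_meld_run, hMv, hMv0, hM1, hSv,
                hne1, hne2, hne3, hne4] at e1 e2
              have hb0 : b = 0 := by omega
              have hn0 : L.count (v, false) = 0 := by omega
              refine ⟨hb0, ?_⟩
              apply (ih 0 0 _ hinvr le_rfl le_rfl).mpr
              rw [pvPX_cons]
              refine ⟨L.filter (fun p => decide (p.1 ≠ v)),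
                fun p hp => hok p (List.mem_of_mem_filter hp), ?_, ?_⟩
              · rw [Multiset.le_iff_count]
                intro x
                have hx := Multiset.le_iff_count.mp hle x
                simp only [Multiset.count_add, Multiset.count_nsmul, Multiset.count_replicate,
                  count_meld_tri, count_meld_run, hMv,
                  show ((0 : Int) + 0).toNat = 0 from rfl, show ((0 : Int)).toNat = 0 from rfl,
                  Multiset.replicate_zero, Multiset.count_zero, zero_add] at hx ⊢
                by_cases hx1 : v = x
                · subst hx1
                  split_ifs at hx ⊢ <;> omega
                · split_ifs at hx ⊢ <;> omega
              · push_cast [hlen] at hneed ⊢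
                omega

theorem pvScan_nil (states : List (Int × Int × Int)) :
    pvScan [] states = states.any (fun s => s.1 == 0 && s.2.1 == 0 && s.2.2 == 0) := rfl

theorem pvScan_cons (v c : Int) (rest : List (Int × Int)) (states : List (Int × Int × Int)) :
    pvScan ((v, c) :: rest) states =
      (if states.any (fun s => s.1 == 0 && s.2.1 == 0 && s.2.2 == 0) then true
      else pvScan rest (pvStep v c (pvSucc rest v) states)) := rfl

theorem mem_foldl_add (l : List Int) (f : Int → Int × Int × Int)
    (acc : List (Int × Int × Int)) (x : Int × Int × Int) :
    x ∈ l.foldl (fun nxt2 n => PySem.Set.add nxt2 (f n)) acc ↔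
      x ∈ acc ∨ ∃ n ∈ l, x = f n := by
  induction l generalizing acc with
  | nil => simp
  | cons m rest ih =>
    simp only [List.foldl_cons, ih, PySem.Set.mem_add, List.mem_cons]
    constructor
    · rintro ((h | h) | ⟨n, hn, rfl⟩)
      · exact Or.inl h
      · exact Or.inr ⟨m, Or.inl rfl, h⟩
      · exact Or.inr ⟨n, Or.inr hn, rfl⟩
    · rintro (h | ⟨n, (rfl | hn), h⟩)
      · exact Or.inl (Or.inl h)
      · exact Or.inl (Or.inr h)
      · exact Or.inr ⟨n, hn, h⟩

theorem mem_step_aux (v c : Int) (sb : Bool) (states : List (Int × Int × Int))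
    (acc : List (Int × Int × Int)) (s' : Int × Int × Int) :
    s' ∈ states.foldl (fun nxt s =>
      if c < s.1 + s.2.1 then nxt
      else if sb then
        (PySem.List.pyRange 0 ((if v ≤ 7 then min (c - s.1 - s.2.1) s.2.2 else 0) + 1) 1).foldl
          (fun nxt2 n => PySem.Set.add nxt2
            (s.2.1, n, max (s.2.2 - s.1 - PySem.Int.floordiv (c - s.1 - s.2.1 - n) 3) 0)) nxt
      else if s.2.1 == 0 then
        PySem.Set.add nxt (0, 0, max (s.2.2 - s.1 - PySem.Int.floordiv (c - s.1 - s.2.1) 3) 0)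
      else nxt) acc ↔
    s' ∈ acc ∨ ∃ s ∈ states, ¬ c < s.1 + s.2.1 ∧
      ((sb = true ∧ ∃ n : Int, 0 ≤ n ∧
          n < (if v ≤ 7 then min (c - s.1 - s.2.1) s.2.2 else 0) + 1 ∧
          s' = (s.2.1, n, max (s.2.2 - s.1 - PySem.Int.floordiv (c - s.1 - s.2.1 - n) 3) 0)) ∨
       (sb = false ∧ s.2.1 = 0 ∧
          s' = (0, 0, max (s.2.2 - s.1 - PySem.Int.floordiv (c - s.1 - s.2.1) 3) 0))) := by
  induction states generalizing acc with
  | nil => simp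
  | cons s0 rest ih =>
    rw [List.foldl_cons, ih]
    by_cases h1 : c < s0.1 + s0.2.1
    · rw [if_pos h1]
      constructor
      · rintro (h | ⟨s, hs, hc⟩)
        · exact Or.inl h
        · exact Or.inr ⟨s, List.mem_cons_of_mem _ hs, hc⟩
      · rintro (h | ⟨s, hs, hc⟩)
        · exact Or.inl h
        · rcases List.mem_cons.mp hs with rfl | hs'
          · exact absurd h1 hc.1
          · exact Or.inr ⟨s, hs', hc⟩
    · rw [if_neg h1]
      cases sb with
      | true =>
        rw [if_pos rfl]
        rw [mem_foldl_add]
        constructor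
        · rintro ((h | ⟨n, hn, rfl⟩) | ⟨s, hs, hc⟩)
          · exact Or.inl h
          · obtain ⟨hn0, hnhi⟩ := PySem.List.mem_pyRange_one.mp hn
            exact Or.inr ⟨s0, List.mem_cons_self, h1, Or.inl ⟨rfl, n, hn0, hnhi, rfl⟩⟩
          · exact Or.inr ⟨s, List.mem_cons_of_mem _ hs, hc⟩
        · rintro (h | ⟨s, hs, hcab, hbr⟩)
          · exact Or.inl (Or.inl h)
          · rcases List.mem_cons.mp hs with rfl | hs'
            · rcases hbr with ⟨-, n, hn0, hnhi, rfl⟩ | ⟨hfalse, -, -⟩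
              · exact Or.inl (Or.inr ⟨n, PySem.List.mem_pyRange_one.mpr ⟨hn0, hnhi⟩, rfl⟩)
              · cases hfalse
            · exact Or.inr ⟨s, hs', hcab, hbr⟩
      | false =>
        rw [if_neg (by simp)]
        by_cases hb0 : s0.2.1 = 0
        · rw [if_pos (by simp [hb0])]
          rw [show (PySem.Set.add acc
              (0, 0, max (s0.2.2 - s0.1 - PySem.Int.floordiv (c - s0.1 - s0.2.1) 3) 0) :
              List (Int × Int × Int)) = _ from rfl]
          constructor
          · intro h
            rcases h with h | ⟨s, hs, hc⟩
            · rcases (PySem.Set.mem_add _ _ _).mp h with h' | h'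
              · exact Or.inl h'
              · exact Or.inr ⟨s0, List.mem_cons_self, h1, Or.inr ⟨rfl, hb0, h'⟩⟩
            · exact Or.inr ⟨s, List.mem_cons_of_mem _ hs, hc⟩
          · rintro (h | ⟨s, hs, hcab, hbr⟩)
            · exact Or.inl ((PySem.Set.mem_add _ _ _).mpr (Or.inl h))
            · rcases List.mem_cons.mp hs with rfl | hs'
              · rcases hbr with ⟨hfalse, -⟩ | ⟨-, -, rfl⟩
                · cases hfalse
                · exact Or.inl ((PySem.Set.mem_add _ _ _).mpr (Or.inr rfl))
              · exact Or.inr ⟨s, hs', hcab, hbr⟩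
        · rw [if_neg (by simp [hb0])]
          constructor
          · rintro (h | ⟨s, hs, hc⟩)
            · exact Or.inl h
            · exact Or.inr ⟨s, List.mem_cons_of_mem _ hs, hc⟩
          · rintro (h | ⟨s, hs, hcab, hbr⟩)
            · exact Or.inl h
            · rcases List.mem_cons.mp hs with rfl | hs'
              · rcases hbr with ⟨hfalse, -⟩ | ⟨-, hb0', -⟩
                · cases hfalse
                · exact absurd hb0' hb0
              · exact Or.inr ⟨s, hs', hcab, hbr⟩

theorem mem_step (v c : Int) (sb : Bool) (states : List (Int × Int × Int))
    (s' : Int × Int × Int) :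
    s' ∈ pvStep v c sb states ↔ ∃ s ∈ states, ¬ c < s.1 + s.2.1 ∧
      ((sb = true ∧ ∃ n : Int, 0 ≤ n ∧
          n < (if v ≤ 7 then min (c - s.1 - s.2.1) s.2.2 else 0) + 1 ∧
          s' = (s.2.1, n, max (s.2.2 - s.1 - PySem.Int.floordiv (c - s.1 - s.2.1 - n) 3) 0)) ∨
       (sb = false ∧ s.2.1 = 0 ∧
          s' = (0, 0, max (s.2.2 - s.1 - PySem.Int.floordiv (c - s.1 - s.2.1) 3) 0))) := by
  rw [pvStep, mem_step_aux]
  simp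

theorem dp_clamp (items : List (Int × Int)) : ∀ (a b need : Int), 0 ≤ a → 0 ≤ b → need ≤ 0 →
    pvDp items a b need = pvDp items a b 0 := by
  induction items with
  | nil =>
    intro a b need _ _ hn
    rw [pvDp_nil, pvDp_nil]
    by_cases hE0 : a = 0 ∧ b = 0
    · rw [if_pos ⟨hn, hE0.1, hE0.2⟩, if_pos ⟨le_refl 0, hE0.1, hE0.2⟩]
    · rw [if_neg (show ¬ (need ≤ 0 ∧ a = 0 ∧ b = 0) from fun h => hE0 ⟨h.2.1, h.2.2⟩),
        if_neg (show ¬ ((0 : Int) ≤ 0 ∧ a = 0 ∧ b = 0) from fun h => hE0 ⟨h.2.1, h.2.2⟩)]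
  | cons q rest ih =>
    obtain ⟨v, c⟩ := q
    intro a b need ha hb hn
    rw [pvDp_cons, pvDp_cons]
    by_cases hE0 : a = 0 ∧ b = 0
    · rw [if_pos ⟨hn, hE0.1, hE0.2⟩, if_pos ⟨le_refl 0, hE0.1, hE0.2⟩]
    · rw [if_neg (show ¬ (need ≤ 0 ∧ a = 0 ∧ b = 0) from fun h => hE0 ⟨h.2.1, h.2.2⟩),
        if_neg (show ¬ ((0 : Int) ≤ 0 ∧ a = 0 ∧ b = 0) from fun h => hE0 ⟨h.2.1, h.2.2⟩)]
      by_cases hcab : c < a + b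
      · rw [if_pos hcab, if_pos hcab]
      · rw [if_neg hcab, if_neg hcab]
        rw [show max need 0 = max (0 : Int) 0 by omega]
        by_cases hsb : pvSucc rest v = true
        · rw [if_pos hsb, if_pos hsb]
          apply Bool.coe_iff_coe.mp
          rw [List.any_eq_true, List.any_eq_true]
          have hchild : ∀ n : Int, n ∈ PySem.List.pyRange 0
              ((if v ≤ 7 then min (c - a - b) (max (0 : Int) 0) else 0) + 1) 1 →
              pvDp rest b n (need - a - PySem.Int.floordiv (c - a - b - n) 3) =
              pvDp rest b n (0 - a - PySem.Int.floordiv (c - a - b - n) 3) := by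
            intro n hn
            obtain ⟨hn0, hnhi⟩ := PySem.List.mem_pyRange_one.mp hn
            have hfd : PySem.Int.floordiv (c - a - b - n) 3 = (c - a - b - n) / 3 := fd3 _
            have h1 : n ≤ c - a - b := by
              split_ifs at hnhi <;> omega
            rw [ih b n _ hb hn0 (by omega),
              ← ih b n (0 - a - PySem.Int.floordiv (c - a - b - n) 3) hb hn0 (by omega)]
          constructor
          · rintro ⟨n, hn, hf⟩
            exact ⟨n, hn, by rw [← hchild n hn]; exact hf⟩
          · rintro ⟨n, hn, hf⟩
            exact ⟨n, hn, by rw [hchild n hn]; exact hf⟩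
        · rw [if_neg hsb, if_neg hsb]
          have hfd : PySem.Int.floordiv (c - a - b) 3 = (c - a - b) / 3 := fd3 _
          rw [ih 0 0 _ le_rfl le_rfl (by omega),
            ← ih 0 0 (0 - a - PySem.Int.floordiv (c - a - b) 3) le_rfl le_rfl (by omega)]

theorem dp_max0 (items : List (Int × Int)) (a b need : Int) (ha : 0 ≤ a) (hb : 0 ≤ b) :
    pvDp items a b (max need 0) = pvDp items a b need := by
  by_cases h : need ≤ 0
  · rw [show max need 0 = 0 by omega, dp_clamp items a b need ha hb h]
  · rw [show max need 0 = need by omega]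

theorem scan_iff (items : List (Int × Int)) : ∀ (states : List (Int × Int × Int)),
    (∀ s ∈ states, 0 ≤ s.1 ∧ 0 ≤ s.2.1 ∧ 0 ≤ s.2.2) →
    (pvScan items states = true ↔
      ∃ s ∈ states, pvDp items s.1 s.2.1 s.2.2 = true) := by
  induction items with
  | nil =>
    intro states hinv
    rw [pvScan_nil, List.any_eq_true]
    constructor
    · rintro ⟨s, hs, hacc⟩
      simp only [Bool.and_eq_true, beq_iff_eq] at hacc
      refine ⟨s, hs, ?_⟩
      rw [pvDp_nil, if_pos ⟨le_of_eq hacc.2, hacc.1.1, hacc.1.2⟩]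
    · rintro ⟨s, hs, hdp⟩
      rw [pvDp_nil] at hdp
      split_ifs at hdp with hC
      · obtain ⟨-, -, h2⟩ := hinv s hs
        refine ⟨s, hs, ?_⟩
        simp only [Bool.and_eq_true, beq_iff_eq]
        exact ⟨⟨hC.2.1, hC.2.2⟩, by omega⟩
  | cons q rest ih =>
    obtain ⟨v, c⟩ := q
    intro states hinv
    rw [pvScan_cons]
    by_cases hacc : states.any (fun s => s.1 == 0 && s.2.1 == 0 && s.2.2 == 0) = true
    · rw [if_pos hacc]
      simp only [true_iff]
      obtain ⟨s, hs, h⟩ := List.any_eq_true.mp hacc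
      simp only [Bool.and_eq_true, beq_iff_eq] at h
      refine ⟨s, hs, ?_⟩
      rw [pvDp_cons, if_pos ⟨le_of_eq h.2, h.1.1, h.1.2⟩]
    · rw [if_neg hacc]
      have hnoacc : ∀ s ∈ states, 0 ≤ s.2.2 →
          ¬ (s.2.2 ≤ 0 ∧ s.1 = 0 ∧ s.2.1 = 0) := by
        intro s hs h2 hE
        apply hacc
        rw [List.any_eq_true]
        refine ⟨s, hs, ?_⟩
        simp only [Bool.and_eq_true, beq_iff_eq]
        exact ⟨⟨hE.2.1, hE.2.2⟩, by omega⟩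
      have hstep_inv : ∀ s' ∈ pvStep v c (pvSucc rest v) states,
          0 ≤ s'.1 ∧ 0 ≤ s'.2.1 ∧ 0 ≤ s'.2.2 := by
        intro s' hs'
        rw [mem_step] at hs'
        obtain ⟨s, hs, -, hbr⟩ := hs'
        obtain ⟨-, hB, -⟩ := hinv s hs
        rcases hbr with ⟨-, n, hn0, -, rfl⟩ | ⟨-, -, rfl⟩
        · exact ⟨hB, hn0, le_max_right _ _⟩
        · exact ⟨le_rfl, le_rfl, le_max_right _ _⟩
      rw [ih _ hstep_inv]
      constructor
      · rintro ⟨s', hs', hdp⟩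
        rw [mem_step] at hs'
        obtain ⟨s, hs, hcab, hbr⟩ := hs'
        obtain ⟨hA, hB, hC⟩ := hinv s hs
        refine ⟨s, hs, ?_⟩
        rw [pvDp_cons, if_neg (hnoacc s hs hC), if_neg hcab]
        rcases hbr with ⟨hsb, n, hn0, hnhi, rfl⟩ | ⟨hsb, hb0, rfl⟩
        · rw [if_pos hsb, List.any_eq_true]
          refine ⟨n, PySem.List.mem_pyRange_one.mpr ⟨hn0, ?_⟩, ?_⟩
          · rw [show max s.2.2 0 = s.2.2 by omega]
            exact hnhi
          · rw [← dp_max0 rest s.2.1 n _ hB hn0]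
            exact hdp
        · rw [if_neg (by simp [hsb]), Bool.and_eq_true]
          refine ⟨by simp [hb0], ?_⟩
          rw [← dp_max0 rest 0 0 _ le_rfl le_rfl]
          exact hdp
      · rintro ⟨s, hs, hdp⟩
        obtain ⟨hA, hB, hC⟩ := hinv s hs
        rw [pvDp_cons, if_neg (hnoacc s hs hC)] at hdp
        by_cases hcab : c < s.1 + s.2.1
        · rw [if_pos hcab] at hdp
          cases hdp
        · rw [if_neg hcab] at hdp
          by_cases hsb : pvSucc rest v = true
          · rw [if_pos hsb, List.any_eq_true] at hdp
            obtain ⟨n, hn, hf⟩ := hdp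
            obtain ⟨hn0, hnhi⟩ := PySem.List.mem_pyRange_one.mp hn
            refine ⟨(s.2.1, n,
              max (s.2.2 - s.1 - PySem.Int.floordiv (c - s.1 - s.2.1 - n) 3) 0),
              (mem_step _ _ _ _ _).mpr ⟨s, hs, hcab, Or.inl ⟨hsb, n, hn0, ?_, rfl⟩⟩, ?_⟩
            · rw [show max s.2.2 0 = s.2.2 by omega] at hnhi
              exact hnhi
            · rw [dp_max0 rest s.2.1 n _ hB hn0]
              exact hf
          · rw [if_neg hsb, Bool.and_eq_true, beq_iff_eq] at hdp
            refine ⟨(0, 0, max (s.2.2 - s.1 - PySem.Int.floordiv (c - s.1 - s.2.1) 3) 0),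
              (mem_step _ _ _ _ _).mpr ⟨s, hs, hcab,
                Or.inr ⟨by revert hsb; cases (pvSucc rest v) <;> simp, hdp.1, rfl⟩⟩, ?_⟩
            rw [dp_max0 rest 0 0 _ le_rfl le_rfl]
            exact hdp.2

theorem scan_eq_dp (items : List (Int × Int)) :
    pvScan items [(0, 0, 4)] = pvDp items 0 0 4 := by
  have hinv : ∀ s ∈ ([((0 : Int), (0 : Int), (4 : Int))] : List (Int × Int × Int)),
      0 ≤ s.1 ∧ 0 ≤ s.2.1 ∧ 0 ≤ s.2.2 := by
    intro s hs
    rw [List.mem_singleton] at hs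
    subst hs
    exact ⟨le_rfl, le_rfl, by norm_num⟩
  apply Bool.coe_iff_coe.mp
  rw [scan_iff items _ hinv]
  constructor
  · rintro ⟨s, hs, h⟩
    rw [List.mem_singleton] at hs
    subst hs
    exact h
  · intro h
    exact ⟨(0, 0, 4), List.mem_singleton.mpr rfl, h⟩

theorem dp_extract (items : List (Int × Int)) (hinv : pvInv items) :
    pvDp items 0 0 4 = true ↔ pvExtract (pvToM items) 4 := by
  rw [dp_iff items 0 0 4 hinv le_rfl le_rfl]
  cases items with
  | nil =>
    rw [pvPX_nil]
    constructor
    · rintro ⟨-, -, h⟩; omega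
    · intro h
      exact absurd h (by rw [show pvToM [] = 0 from rfl]; exact pvExtract_nil_succ 3)
  | cons q rest =>
    obtain ⟨v, c⟩ := q
    rw [pvPX_cons]
    constructor
    · rintro ⟨L, hok, hle, hneed⟩
      simp only [show ((0 : Int) + 0).toNat = 0 from rfl, show ((0 : Int)).toNat = 0 from rfl,
        Multiset.replicate_zero, zero_add] at hle hneed
      have hsub : (List.map pvMeld (L.take 4)).sum ≤ (List.map pvMeld L).sum := by
        conv_rhs => rw [← List.take_append_drop 4 L]
        rw [List.map_append, List.sum_append]
        exact Multiset.le_add_right _ _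
      refine ⟨L.take 4, ?_, fun p hp => hok p (List.take_subset _ _ hp),
        le_trans hsub hle⟩
      rw [List.length_take]
      omega
    · rintro ⟨L, hlen, hok, hle⟩
      refine ⟨L, hok, ?_, ?_⟩
      · simpa using hle
      · rw [hlen]; norm_num

-- ===== top-level glue =====

def pvSK (tiles : List Int) : List Int :=
  PySem.List.sorted (PySem.Dict.counter tiles).keys (fun x => x) false

def pvItems0 (tiles : List Int) : List (Int × Int) :=
  (pvSK tiles).map (fun v => (v, (PySem.Dict.counter tiles).getD v 0))

theorem sk_mem (tiles : List Int) (x : Int) : x ∈ pvSK tiles ↔ x ∈ tiles := by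
  rw [pvSK, PySem.List.mem_sorted, PySem.Dict.keys_counter, PySem.Set.mem_ofList]

theorem sk_pairwise (tiles : List Int) : (pvSK tiles).Pairwise (· < ·) := by
  have hnd : (pvSK tiles).Nodup := by
    rw [pvSK]
    exact (PySem.List.sorted_perm _ _ _).nodup_iff.mpr
      (by rw [PySem.Dict.keys_counter]; exact PySem.Set.nodup_ofList tiles)
  have hle : (pvSK tiles).Pairwise (fun a b => a ≤ b) := by
    have := PySem.List.sorted_pairwise (key := fun x : Int => x)
      (xs := (PySem.Dict.counter tiles).keys)
    exact this
  exact (hle.and hnd).imp fun {a b} h => lt_of_le_of_ne h.1 h.2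

theorem items0_inv (tiles : List Int) : pvInv (pvItems0 tiles) := by
  constructor
  · rw [pvItems0, List.pairwise_map]
    exact sk_pairwise tiles
  · intro p hp
    rw [pvItems0] at hp
    obtain ⟨v, hv, rfl⟩ := List.mem_map.mp hp
    rw [PySem.Dict.getD_counter]
    have : v ∈ tiles := (sk_mem tiles v).mp hv
    have := List.count_pos_iff.mpr this
    omega

theorem count_toM_map (vs : List Int) (f : Int → Int) (x : Int) (hnd : vs.Nodup) :
    (pvToM (vs.map (fun v => (v, f v)))).count x = if x ∈ vs then (f x).toNat else 0 := by
  induction vs with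
  | nil => simp [pvToM]
  | cons v vs ih =>
    rw [List.map_cons, pvToM_cons, Multiset.count_add, Multiset.count_replicate,
      ih (List.nodup_cons.mp hnd).2]
    by_cases hxv : x = v
    · subst hxv
      have hnv : x ∉ vs := (List.nodup_cons.mp hnd).1
      simp [hnv]
    · rw [if_neg (fun h => hxv h.symm)]
      by_cases hx : x ∈ vs
      · rw [if_pos hx, if_pos (List.mem_cons_of_mem _ hx)]
        omega
      · rw [if_neg hx, if_neg (by simp [hx, hxv])]

theorem items0_toM (tiles : List Int) : pvToM (pvItems0 tiles) = ↑tiles := by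
  ext x
  rw [pvItems0, Multiset.coe_count]
  have hnd : (pvSK tiles).Nodup :=
    (sk_pairwise tiles).imp (fun h => ne_of_lt h)
  have := count_toM_map (pvSK tiles) (fun v => (PySem.Dict.counter tiles).getD v 0) x hnd
  rw [this]
  by_cases hx : x ∈ pvSK tiles
  · rw [if_pos hx]
    simp only [PySem.Dict.getD_counter]
    omega
  · rw [if_neg hx]
    have : x ∉ tiles := fun h => hx ((sk_mem tiles x).mpr h)
    rw [List.count_eq_zero_of_not_mem this]

theorem pvToM_append (l1 l2 : List (Int × Int)) :
    pvToM (l1 ++ l2) = pvToM l1 + pvToM l2 := by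
  simp [pvToM]

theorem items0_getElem (tiles : List Int) (k : Nat) (hk : k < (pvItems0 tiles).length) :
    (pvItems0 tiles)[k] = ((pvSK tiles)[k]'(by simpa [pvItems0] using hk),
      ((tiles.count ((pvSK tiles)[k]'(by simpa [pvItems0] using hk)) : Nat) : Int)) := by
  simp only [pvItems0, List.getElem_map, PySem.Dict.getD_counter]

theorem mod_facts (l : List (Int × Int)) (hinv : pvInv l) (k : Nat) (hk : k < l.length)
    (hc : 2 ≤ l[k].2) :
    pvInv (l.take k ++ (if 2 < l[k].2 then [(l[k].1, l[k].2 - 2)] else []) ++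
        l.drop (k + 1)) ∧
      pvToM (l.take k ++ (if 2 < l[k].2 then [(l[k].1, l[k].2 - 2)] else []) ++
        l.drop (k + 1)) = pvToM l - {l[k].1} - {l[k].1} := by
  have hdecomp : l = l.take k ++ l[k] :: l.drop (k + 1) := by
    rw [List.getElem_cons_drop, List.take_append_drop]
  have hpw : (l.take k ++ l[k] :: l.drop (k + 1)).Pairwise (fun a b => a.1 < b.1) := by
    rw [← hdecomp]; exact hinv.1
  rw [List.pairwise_append] at hpw
  obtain ⟨hpw1, hpw2, hcross⟩ := hpw
  rw [List.pairwise_cons] at hpw2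
  obtain ⟨hxd, hpwd⟩ := hpw2
  have hmid_fst : ∀ q ∈ (if 2 < l[k].2 then [(l[k].1, l[k].2 - 2)] else []),
      q.1 = l[k].1 ∧ 1 ≤ q.2 := by
    intro q hq
    split_ifs at hq with h2
    · rw [List.mem_singleton] at hq
      subst hq
      exact ⟨rfl, by omega⟩
    · simp at hq
  constructor
  · constructor
    · rw [List.append_assoc, List.pairwise_append]
      refine ⟨hpw1, ?_, ?_⟩
      · rw [List.pairwise_append]
        refine ⟨?_, hpwd, ?_⟩
        · split_ifs <;> simp
        · intro q hq b hb
          rw [(hmid_fst q hq).1]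
          exact hxd b hb
      · intro a ha b hb
        rcases List.mem_append.mp hb with hb' | hb'
        · rw [(hmid_fst b hb').1]
          exact hcross a ha _ List.mem_cons_self
        · exact hcross a ha b (List.mem_cons_of_mem _ hb')
    · intro p hp
      rcases List.mem_append.mp hp with hp' | hp'
      · rcases List.mem_append.mp hp' with hp'' | hp''
        · exact hinv.2 p (List.take_subset _ _ hp'')
        · exact (hmid_fst p hp'').2
      · exact hinv.2 p (List.drop_subset _ _ hp')
  · have htl : pvToM l = pvToM (l.take k) +
        (Multiset.replicate (l[k].2).toNat (l[k].1) + pvToM (l.drop (k + 1))) := by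
      conv_lhs => rw [hdecomp]
      rw [pvToM_append, show pvToM (l[k] :: l.drop (k + 1)) =
        Multiset.replicate (l[k].2).toNat (l[k].1) + pvToM (l.drop (k + 1)) from
        pvToM_cons _ _ _]
    rw [List.append_assoc, pvToM_append, pvToM_append]
    ext a
    have hmidc : (pvToM (if 2 < l[k].2 then [(l[k].1, l[k].2 - 2)] else [])).count a =
        if l[k].1 = a then (l[k].2 - 2).toNat else 0 := by
      split_ifs with h2 ha2
      · rw [show pvToM [(l[k].1, l[k].2 - 2)] =
            Multiset.replicate (l[k].2 - 2).toNat (l[k].1) by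
          rw [pvToM_cons, show pvToM [] = 0 from rfl, add_zero]]
        rw [Multiset.count_replicate, if_pos ha2]
      · rw [show pvToM [(l[k].1, l[k].2 - 2)] =
            Multiset.replicate (l[k].2 - 2).toNat (l[k].1) by
          rw [pvToM_cons, show pvToM [] = 0 from rfl, add_zero]]
        rw [Multiset.count_replicate, if_neg ha2]
      · rw [show pvToM ([] : List (Int × Int)) = 0 from rfl, Multiset.count_zero]
        omega
      · rw [show pvToM ([] : List (Int × Int)) = 0 from rfl, Multiset.count_zero]
    have htlc := congrArg (Multiset.count a) htl
    simp only [Multiset.count_add, Multiset.count_replicate] at htlc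
    simp only [Multiset.count_add, Multiset.count_sub, Multiset.count_singleton, hmidc]
    by_cases ha : l[k].1 = a
    · subst ha
      simp at htlc ⊢
      omega
    · rw [if_neg ha] at htlc
      rw [if_neg ha, if_neg (fun h => ha h.symm)]
      omega

theorem rm2_coe (tiles : List Int) (t : Int) (h : 2 ≤ tiles.count t) :
    (↑(pvRm (pvRm tiles t) t) : Multiset Int) = ↑tiles - {t} - {t} := by
  have m1 : t ∈ tiles := List.count_pos_iff.mp (by omega)
  have e1 := pvRm_coe tiles t m1
  have c1 : (↑(pvRm tiles t) : Multiset Int).count t = tiles.count t - 1 := by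
    rw [e1, Multiset.count_sub, Multiset.coe_count, Multiset.count_singleton, if_pos rfl]
  have m2 : t ∈ pvRm tiles t := by
    rw [← Multiset.mem_coe, ← Multiset.count_pos, c1]; omega
  rw [pvRm_coe _ t m2, e1]

theorem main_eq (tiles : List Int) : is_complete_hand tiles = is_complete_hand_alt tiles := by
  show (if (PySem.Dict.counter tiles).size == 7 &&
        (PySem.Dict.counter tiles).values.all (fun v => v == 2) then true
      else (PySem.Dict.counter tiles).keys.any fun t =>
        decide (2 ≤ (PySem.Dict.counter tiles).getD t 0) &&
          canFormMelds (pvRm (pvRm tiles t) t) 4)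
    = (if (PySem.Dict.counter tiles).size == 7 &&
        (PySem.Dict.counter tiles).values.all (fun v => v == 2) then true
      else (PySem.List.enumerate (pvItems0 tiles) 0).any fun p =>
        decide (2 ≤ p.2.2) &&
          pvScan (PySem.List.slice (pvItems0 tiles) none (some p.1) ++
            (if 2 < p.2.2 then [(p.2.1, p.2.2 - 2)] else []) ++
            PySem.List.slice (pvItems0 tiles) (some (p.1 + 1)) none) [(0, 0, 4)])
  split_ifs with hchi
  · rfl
  · apply Bool.coe_iff_coe.mp
    rw [List.any_eq_true, List.any_eq_true]
    constructor
    · rintro ⟨t, htk, hcond⟩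
      rw [Bool.and_eq_true, decide_eq_true_eq, PySem.Dict.getD_counter] at hcond
      obtain ⟨hc2, hmelds⟩ := hcond
      have hc2' : 2 ≤ tiles.count t := by exact_mod_cast hc2
      have htt : t ∈ tiles := by
        rw [PySem.Dict.keys_counter, PySem.Set.mem_ofList] at htk
        exact htk
      have hext : pvExtract (↑tiles - {t} - {t}) 4 := by
        rw [← rm2_coe tiles t hc2', ← A_iff]
        exact hmelds
      obtain ⟨k, hk, hkt⟩ := List.mem_iff_getElem.mp ((sk_mem tiles t).mpr htt)
      have hk' : k < (pvItems0 tiles).length := by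
        rw [pvItems0, List.length_map]; exact hk
      have hxk := items0_getElem tiles k hk'
      refine ⟨((0 : Int) + (k : Int), (pvItems0 tiles)[k]),
        (PySem.List.mem_enumerate_iff _ _ _).mpr ⟨k, hk', rfl⟩, ?_⟩
      rw [Bool.and_eq_true, decide_eq_true_eq]
      have hfst : (pvItems0 tiles)[k].1 = t := by rw [hxk]; exact hkt
      have hsnd : (pvItems0 tiles)[k].2 = ((tiles.count t : Nat) : Int) := by
        rw [hxk]; simp [hkt]
      constructor
      · show 2 ≤ (pvItems0 tiles)[k].2
        rw [hsnd]; exact_mod_cast hc2'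
      · show pvScan (PySem.List.slice (pvItems0 tiles) none (some (0 + (k : Int))) ++ _ ++
          PySem.List.slice (pvItems0 tiles) (some ((0 + (k : Int)) + 1)) none) [(0, 0, 4)] = true
        rw [scan_eq_dp]
        rw [show (0 : Int) + (k : Int) = ((k : Nat) : Int) by omega]
        rw [PySem.List.slice_to_natCast]
        rw [show ((k : Nat) : Int) + 1 = (((k + 1 : Nat) : Nat) : Int) by push_cast; ring]
        rw [PySem.List.slice_from_natCast]
        have hmf := mod_facts (pvItems0 tiles) (items0_inv tiles) k hk'
          (by rw [hsnd]; exact_mod_cast hc2')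
        rw [dp_extract _ hmf.1, hmf.2, items0_toM, hfst]
        exact hext
    · rintro ⟨p, hpmem, hcond⟩
      obtain ⟨k, hk', hpk⟩ := (PySem.List.mem_enumerate_iff _ _ _).mp hpmem
      subst hpk
      rw [Bool.and_eq_true, decide_eq_true_eq] at hcond
      obtain ⟨hc2, hdp⟩ := hcond
      simp only at hc2 hdp
      have hxk := items0_getElem tiles k hk'
      set t := (pvItems0 tiles)[k].1 with hts
      have hsnd : (pvItems0 tiles)[k].2 = ((tiles.count t : Nat) : Int) := by
        rw [hxk]; rw [hts, hxk]
      have hc2' : 2 ≤ tiles.count t := by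
        rw [hsnd] at hc2; exact_mod_cast hc2
      have htt : t ∈ tiles := List.count_pos_iff.mp (by omega)
      refine ⟨t, ?_, ?_⟩
      · rw [PySem.Dict.keys_counter, PySem.Set.mem_ofList]; exact htt
      · rw [Bool.and_eq_true, decide_eq_true_eq, PySem.Dict.getD_counter]
        refine ⟨by exact_mod_cast hc2', ?_⟩
        rw [A_iff, rm2_coe tiles t hc2']
        rw [scan_eq_dp] at hdp
        rw [show (0 : Int) + (k : Int) = ((k : Nat) : Int) by omega] at hdp
        rw [PySem.List.slice_to_natCast] at hdp
        rw [show ((k : Nat) : Int) + 1 = (((k + 1 : Nat) : Nat) : Int) by push_cast; ring] at hdp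
        rw [PySem.List.slice_from_natCast] at hdp
        have hmf := mod_facts (pvItems0 tiles) (items0_inv tiles) k hk'
          (by rw [hsnd]; exact_mod_cast hc2')
        rw [dp_extract _ hmf.1, hmf.2, items0_toM] at hdp
        exact hdp

-- ===== VERDICT (by name: the statement is the Claim_ definition above) =====
theorem is_complete_hand_spec : Claim_equal_is_complete_hand := by
  intro tiles _
  unfold Spec_is_complete_hand
  exact main_eq tiles
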